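-- pv_equiv track=rewrite | github.com/smayya337/libcodebusters | Utils.py | convert
-- ===== SOURCE A (Python) =====
-- def isLetter(i: int):
--     return 65 <= i <= 90
--
-- def convert(text: str, mapped: list):
--     out: str = ""
--     text = text.upper()
--     for i in range(0, len(text)):
--         ascii_val: int = ord(text[i])
--         if isLetter(ascii_val):
--             out += mapped[ascii_val - 65]
--         else:
--             out += chr(ascii_val)
--     return out
-- ===== SOURCE B (Python) =====
-- def convert(text: str, mapped: list):
--     text = text.upper()
--     table = {ord(c): mapped[ord(c) - 65] for c in set(text) if 65 <= ord(c) <= 90}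
--     return text.translate(table)
-- ===== Notes on version B (the rewrite author's own statement) =====
-- stated objective: idiomatic
-- what changed: Replaces the explicit index loop with string concatenation by building a translation dict over the distinct letters present in the uppercased text and calling str.translate once.
import Mathlib
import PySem

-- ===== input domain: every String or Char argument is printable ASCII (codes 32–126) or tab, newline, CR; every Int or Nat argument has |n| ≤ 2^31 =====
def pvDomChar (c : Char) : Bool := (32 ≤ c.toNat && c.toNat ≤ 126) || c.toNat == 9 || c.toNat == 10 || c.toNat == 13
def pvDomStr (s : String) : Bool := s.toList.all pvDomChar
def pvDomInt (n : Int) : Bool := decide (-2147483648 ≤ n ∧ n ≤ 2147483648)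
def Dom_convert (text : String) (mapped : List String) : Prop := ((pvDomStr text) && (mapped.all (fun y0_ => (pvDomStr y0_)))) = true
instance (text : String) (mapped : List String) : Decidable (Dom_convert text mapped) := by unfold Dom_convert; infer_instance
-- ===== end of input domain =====

-- B replaces A's index loop with string concatenation by one str.translate pass over a
-- table built from the distinct letters present in the uppercased text (idiomatic).

-- ===== PORT A =====
def isLetter (i : Int) : Bool := 65 ≤ i && i ≤ 90

-- the loop 'for i in range(0, len(text)): … text[i] …' visits the characters in order;
-- 'mapped[ascii_val - 65]' is pyGet?; its '.getD ""' default is unreachable under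
-- Pre_convert (Python raises IndexError there, which Pre_convert excludes).
def convert (text : String) (mapped : List String) : String :=
  (PySem.Str.upper text).toList.foldl (fun out c =>
    if isLetter ((c.toNat : Int)) then
      out ++ (PySem.List.pyGet? mapped ((c.toNat : Int) - 65)).getD ""
    else
      out ++ String.ofList [c]) ""

-- ===== PORT B =====
-- the dict comprehension '{ord(c): mapped[ord(c)-65] for c in set(text) if 65 <= ord(c) <= 90}';
-- the dict is only looked up afterwards, so the set's iteration order is immaterial.
def convertTable (text : String) (mapped : List String) : PySem.Dict Int String :=
  ((PySem.Set.ofList (PySem.Str.upper text).toList).filter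
      (fun c => isLetter ((c.toNat : Int)))).foldl
    (fun d c => d.insert ((c.toNat : Int))
      ((PySem.List.pyGet? mapped ((c.toNat : Int) - 65)).getD "")) PySem.Dict.empty

-- concatenation of the per-character pieces produced by str.translate
def pvConcat : List String → String
  | [] => ""
  | x :: xs => x ++ pvConcat xs

-- str.translate ported by hand: each character is replaced by its table entry when the
-- table has its code, kept otherwise — exact for a table whose values are strings.
def convert_alt (text : String) (mapped : List String) : String :=
  pvConcat ((PySem.Str.upper text).toList.map (fun c =>
    ((convertTable text mapped).get? ((c.toNat : Int))).getD (String.ofList [c])))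

-- ===== PRECONDITION & SPEC =====
-- Pre_ excludes exactly the inputs where Python A raises IndexError (a letter occurs in
-- the uppercased text whose alphabet index is ≥ len(mapped)); Python B raises there too.
def Pre_convert (text : String) (mapped : List String) : Prop :=
  ((PySem.Str.upper text).toList.all
    (fun c => !(isLetter ((c.toNat : Int))) || decide (c.toNat - 65 < mapped.length))) = true
instance (text : String) (mapped : List String) : Decidable (Pre_convert text mapped) := by unfold Pre_convert; infer_instance
def pvWitness_convert : String × List String := ("aB !", ["x", "y"])

def Spec_convert (text : String) (mapped : List String) (out : String) : Prop := out = convert_alt text mapped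
instance (text : String) (mapped : List String) (out : String) : Decidable (Spec_convert text mapped out) := by unfold Spec_convert; infer_instance

-- ===== CLAIM (what is proved, stated in full; the proofs are below) =====
def Claim_equal_convert : Prop := ∀ (text : String) (mapped : List String), Dom_convert text mapped → Pre_convert text mapped → Spec_convert text mapped (convert text mapped)

-- ===== LEMMAS AND PROOFS =====

-- get? of the fold of inserts keyed by character codes: a char's code hits its own entry
-- iff the char occurs in the folded list (codes are injective in the char).
theorem get?_tableFold (s : List Char) (f : Char → String) (d : PySem.Dict Int String) (c0 : Char) :
    (s.foldl (fun d c => d.insert ((c.toNat : Int)) (f c)) d).get? ((c0.toNat : Int)) =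
      if c0 ∈ s then some (f c0) else d.get? ((c0.toNat : Int)) := by
  induction s generalizing d with
  | nil => simp
  | cons c s ih =>
      simp only [List.foldl_cons, ih]
      by_cases hs : c0 ∈ s
      · simp [hs]
      · by_cases hc : c0 = c
        · subst hc; simp [hs, PySem.Dict.get?_insert_self]
        · have hne : ((c0.toNat : Int)) ≠ ((c.toNat : Int)) := by
            intro h
            have h2 : c0.toNat = c.toNat := by exact_mod_cast h
            exact hc (Char.ext (UInt32.toNat_inj.mp h2))
          simp [hs, hc, PySem.Dict.get?_insert_of_ne _ _ hne]

-- A's accumulator loop equals the concatenation of the pointwise images.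
theorem foldl_eq_concat (p : Char → Bool) (a b g : Char → String) :
    ∀ (l : List Char), (∀ c ∈ l, (if p c then a c else b c) = g c) → ∀ (s : String),
      l.foldl (fun out c => if p c then out ++ a c else out ++ b c) s = s ++ pvConcat (l.map g)
  | [], _, s => by simp [pvConcat]
  | c :: l, h, s => by
      have hc : (if p c then a c else b c) = g c := h c (List.mem_cons_self ..)
      have hrest : ∀ c' ∈ l, (if p c' then a c' else b c') = g c' :=
        fun c' hc' => h c' (List.mem_cons_of_mem _ hc')
      simp only [List.foldl_cons, List.map_cons, pvConcat]
      cases hp : p c with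
      | true =>
          rw [foldl_eq_concat p a b g l hrest, ← hc]
          simp [hp, String.append_assoc]
      | false =>
          rw [foldl_eq_concat p a b g l hrest, ← hc]
          simp [hp, String.append_assoc]

-- ===== VERDICT (by name: the statement is the Claim_ definition above) =====
theorem convert_spec : Claim_equal_convert := by
  intro text mapped _ _
  unfold Spec_convert convert convert_alt
  have hpt : ∀ c ∈ (PySem.Str.upper text).toList,
      (if isLetter ((c.toNat : Int)) then (PySem.List.pyGet? mapped ((c.toNat : Int) - 65)).getD ""
       else String.ofList [c]) =
      ((convertTable text mapped).get? ((c.toNat : Int))).getD (String.ofList [c]) := by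
    intro c hcmem
    unfold convertTable
    rw [get?_tableFold]
    by_cases hl : isLetter ((c.toNat : Int))
    · have hmem : c ∈ (PySem.Set.ofList (PySem.Str.upper text).toList).filter
          (fun c => isLetter ((c.toNat : Int))) := by
        rw [List.mem_filter]
        exact ⟨(PySem.Set.mem_ofList ..).mpr hcmem, hl⟩
      rw [if_pos hl, if_pos hmem]
      simp
    · have hmem : c ∉ (PySem.Set.ofList (PySem.Str.upper text).toList).filter
          (fun c => isLetter ((c.toNat : Int))) := by
        rw [List.mem_filter]
        rintro ⟨_, h2⟩; exact hl h2
      rw [if_neg hl, if_neg hmem]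
      simp
  rw [foldl_eq_concat _ _ _ _ _ hpt ""]
  simp
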